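-- pv_equiv track=rewrite | github.com/kenbockler/Andmeteaduse_masin-ppe_projekt | PROJEKT/K05/S225/2021-09-26-22-35-23/kodu3.py | moos
-- ===== SOURCE A (Python) =====
-- def moos(suurte_karpide_arv, väikeste_karpide_arv, moosi_kogus):
--     suured_karbid=0
--     väiksed_karbid=0
--     while suurte_karpide_arv > 0 and moosi_kogus >= 5:
--         moosi_kogus -= 5
--         suured_karbid += 1
--         suurte_karpide_arv -= 1
--     while väikeste_karpide_arv > 0 and moosi_kogus > 0:
--         moosi_kogus -= 1
--         väiksed_karbid +=1
--         väikeste_karpide_arv -= 1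
--     if moosi_kogus == 0:
--         kasutatud_karbid = väiksed_karbid + suured_karbid
--     else:
--         kasutatud_karbid = -1
--     return (kasutatud_karbid)
-- ===== SOURCE B (Python) =====
-- def moos(suurte_karpide_arv, väikeste_karpide_arv, moosi_kogus):
--     # closed-form: fill big boxes by floor division, then small boxes, no loops
--     big = max(0, min(suurte_karpide_arv, moosi_kogus // 5))
--     rem = moosi_kogus - 5 * big
--     small = max(0, min(väikeste_karpide_arv, rem))
--     return big + small if rem == small else -1
-- ===== Notes on version B (the rewrite author's own statement) =====
-- stated objective: faster
-- what changed: Replaces the two unit-decrement while loops with closed-form min/max and floor-division arithmetic computed in O(1).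
import Mathlib
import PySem

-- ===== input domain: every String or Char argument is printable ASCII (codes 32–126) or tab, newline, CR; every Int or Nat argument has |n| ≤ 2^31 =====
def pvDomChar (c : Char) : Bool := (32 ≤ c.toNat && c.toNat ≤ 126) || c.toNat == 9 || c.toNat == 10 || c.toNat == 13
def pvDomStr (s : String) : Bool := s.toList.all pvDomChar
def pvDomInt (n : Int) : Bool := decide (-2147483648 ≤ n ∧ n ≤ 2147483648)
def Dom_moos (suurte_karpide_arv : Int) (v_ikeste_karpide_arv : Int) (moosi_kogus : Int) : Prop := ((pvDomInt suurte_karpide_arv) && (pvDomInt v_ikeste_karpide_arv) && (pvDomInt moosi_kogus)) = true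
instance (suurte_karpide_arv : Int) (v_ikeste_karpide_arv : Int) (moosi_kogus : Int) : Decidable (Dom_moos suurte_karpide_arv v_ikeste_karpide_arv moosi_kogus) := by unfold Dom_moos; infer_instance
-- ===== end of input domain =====

/- B replaces the two unit-step decrement loops of A by closed-form
   min/max/floor-division arithmetic (objective: faster, O(1) vs O(moosi_kogus)). -/


-- ===== PORT A =====
-- first while loop: returns (suured_karbid, remaining moosi_kogus)
def moosLoop1 (suurte_karpide_arv : Int) (moosi_kogus : Int) (suured_karbid : Int) : Int × Int :=
  if suurte_karpide_arv > 0 ∧ moosi_kogus ≥ 5 then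
    moosLoop1 (suurte_karpide_arv - 1) (moosi_kogus - 5) (suured_karbid + 1)
  else (suured_karbid, moosi_kogus)
termination_by suurte_karpide_arv.toNat
decreasing_by omega

-- second while loop: returns (väiksed_karbid, remaining moosi_kogus)
def moosLoop2 (v_ikeste_karpide_arv : Int) (moosi_kogus : Int) (v_iksed_karbid : Int) : Int × Int :=
  if v_ikeste_karpide_arv > 0 ∧ moosi_kogus > 0 then
    moosLoop2 (v_ikeste_karpide_arv - 1) (moosi_kogus - 1) (v_iksed_karbid + 1)
  else (v_iksed_karbid, moosi_kogus)
termination_by v_ikeste_karpide_arv.toNat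
decreasing_by omega

def moos (suurte_karpide_arv : Int) (v_ikeste_karpide_arv : Int) (moosi_kogus : Int) : Int :=
  let p1 := moosLoop1 suurte_karpide_arv moosi_kogus 0
  let p2 := moosLoop2 v_ikeste_karpide_arv p1.2 0
  if p2.2 = 0 then p2.1 + p1.1 else -1

-- ===== PORT B =====
def moos_alt (suurte_karpide_arv : Int) (v_ikeste_karpide_arv : Int) (moosi_kogus : Int) : Int :=
  let big := max 0 (min suurte_karpide_arv (PySem.Int.floordiv moosi_kogus 5))
  let rem := moosi_kogus - 5 * big
  let small := max 0 (min v_ikeste_karpide_arv rem)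
  if rem = small then big + small else -1

-- ===== PRECONDITION & SPEC =====
def Spec_moos (suurte_karpide_arv : Int) (v_ikeste_karpide_arv : Int) (moosi_kogus : Int) (out : Int) : Prop := out = moos_alt suurte_karpide_arv v_ikeste_karpide_arv moosi_kogus
instance (suurte_karpide_arv : Int) (v_ikeste_karpide_arv : Int) (moosi_kogus : Int) (out : Int) : Decidable (Spec_moos suurte_karpide_arv v_ikeste_karpide_arv moosi_kogus out) := by unfold Spec_moos; infer_instance

-- ===== CLAIM (what is proved, stated in full; the proofs are below) =====
def Claim_equal_moos : Prop := ∀ (suurte_karpide_arv : Int) (v_ikeste_karpide_arv : Int) (moosi_kogus : Int), Dom_moos suurte_karpide_arv v_ikeste_karpide_arv moosi_kogus → Spec_moos suurte_karpide_arv v_ikeste_karpide_arv moosi_kogus (moos suurte_karpide_arv v_ikeste_karpide_arv moosi_kogus)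

-- ===== LEMMAS AND PROOFS =====

theorem moosLoop1_eq (s m c : Int) :
    moosLoop1 s m c = (c + max 0 (min s (PySem.Int.floordiv m 5)),
                       m - 5 * max 0 (min s (PySem.Int.floordiv m 5))) := by
  fun_induction moosLoop1 s m c with
  | case1 s m c h hr =>
    have hdm := PySem.Int.floordiv_mul_add_mod m 5
    have hdm' := PySem.Int.floordiv_mul_add_mod (m - 5) 5
    have hm0 : 0 ≤ PySem.Int.mod m 5 := by
      simpa using PySem.Int.mod_nonneg (a := m) (b := 5) (by norm_num)
    have hm1 : PySem.Int.mod m 5 < 5 := by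
      simpa using PySem.Int.mod_lt (a := m) (b := 5) (by norm_num)
    have hm0' : 0 ≤ PySem.Int.mod (m - 5) 5 := by
      simpa using PySem.Int.mod_nonneg (a := (m - 5)) (b := 5) (by norm_num)
    have hm1' : PySem.Int.mod (m - 5) 5 < 5 := by
      simpa using PySem.Int.mod_lt (a := (m - 5)) (b := 5) (by norm_num)
    rw [hr, Prod.mk.injEq]
    constructor <;> omega
  | case2 s m c h =>
    have hdm := PySem.Int.floordiv_mul_add_mod m 5
    have hm0 : 0 ≤ PySem.Int.mod m 5 := by
      simpa using PySem.Int.mod_nonneg (a := m) (b := 5) (by norm_num)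
    have hm1 : PySem.Int.mod m 5 < 5 := by
      simpa using PySem.Int.mod_lt (a := m) (b := 5) (by norm_num)
    simp only [Prod.mk.injEq]
    constructor <;> omega

theorem moosLoop2_eq (v m c : Int) :
    moosLoop2 v m c = (c + max 0 (min v m), m - max 0 (min v m)) := by
  fun_induction moosLoop2 v m c with
  | case1 v m c h hr =>
    rw [hr, Prod.mk.injEq]
    constructor <;> omega
  | case2 v m c h =>
    simp only [Prod.mk.injEq]
    constructor <;> omega

-- ===== VERDICT (by name: the statement is the Claim_ definition above) =====
theorem moos_spec : Claim_equal_moos := by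
  intro s v m _
  unfold Spec_moos moos moos_alt
  simp only [moosLoop1_eq, moosLoop2_eq]
  split_ifs <;> omega
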